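-- pv_equiv track=rewrite | github.com/abhi10601060/My-Python-Playlist | DATA STRUCTURES/recurssion/subsets and subsequenses/subsequens_duplicate_elements.py | duplicate_subsequence
-- ===== SOURCE A (Python) =====
-- def duplicate_subsequence(arr):
--     ans = [[]]
--     for i in range(len(arr)):
--
--         if i != 0 and arr[i] == arr[i-1]:
--             end1 = len(ans)
--             for j in range(end, len(ans)):
--                 ans.append(ans[j]+[arr[i]])
--             end = end1
--             continue
--
--         end = len(ans)
--
--         for k in range(len(ans)):
--             ans.append(ans[k]+[arr[i]])
--     return ans
-- ===== SOURCE B (Python) =====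
-- def duplicate_subsequence(arr):
--     # run-length decomposition: one scan builds (value, count) runs, then each
--     # run extends the snapshot of ans with 1..count copies (copy-count outer).
--     runs = []
--     for x in arr:
--         if runs and runs[-1][0] == x:
--             runs[-1] = (x, runs[-1][1] + 1)
--         else:
--             runs.append((x, 1))
--     ans = [[]]
--     for v, c in runs:
--         base = ans
--         for k in range(1, c + 1):
--             ans = ans + [s + [v] * k for s in base]
--     return ans
-- ===== Notes on version B (the rewrite author's own statement) =====
-- stated objective: alternative
-- what changed: Replaces A's index-juggling element loop (with the carried 'end' marker into a growing ans list) by a run-length decomposition: one scan builds (value,count) runs, then each run extends a snapshot of ans with 1..count copies of the value, copy-count outer / base-subset inner.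
import Mathlib
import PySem

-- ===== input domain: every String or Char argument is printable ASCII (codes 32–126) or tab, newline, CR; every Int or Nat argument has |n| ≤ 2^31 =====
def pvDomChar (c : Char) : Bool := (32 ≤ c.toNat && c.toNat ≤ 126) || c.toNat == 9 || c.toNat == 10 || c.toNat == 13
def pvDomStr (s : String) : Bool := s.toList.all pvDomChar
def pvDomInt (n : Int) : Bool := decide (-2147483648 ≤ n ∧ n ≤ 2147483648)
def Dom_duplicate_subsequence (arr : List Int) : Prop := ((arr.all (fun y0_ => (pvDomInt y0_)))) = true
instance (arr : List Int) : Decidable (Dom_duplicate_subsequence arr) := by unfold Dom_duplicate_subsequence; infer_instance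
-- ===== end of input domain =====

-- B replaces A's index-marker element loop over a growing ans by a run-length decomposition of arr
-- (one scan into (value,count) runs, then each run extends a snapshot of ans); same value, no speed claim.


-- ===== PORT A =====
-- inner loop 'for j in range(a, b): ans.append(ans[j]+[v])'; on every reachable call each index j
-- is in range (j < b = a length ans already had before the loop), so pyGetD's default is never read.
def pvAInner (v : Int) (a b : Int) (ans : List (List Int)) : List (List Int) :=
  (PySem.List.pyRange a b 1).foldl
    (fun acc j => acc ++ [PySem.List.pyGetD acc j [] ++ [v]]) ans

-- the 'for i in range(len(arr))' loop as structural recursion; prev = arr[i-1] (so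
-- prev = some v ↔ 'i != 0 and arr[i] == arr[i-1]'); e is the carried Python variable 'end'
-- (read only in the duplicate branch, i.e. only after Python has first assigned it).
def pvALoop : List Int → Option Int → List (List Int) → Int → List (List Int)
  | [], _, ans, _ => ans
  | v :: rest, prev, ans, e =>
    if prev = some v then
      let e1 : Int := ans.length
      let ans' := pvAInner v e ans.length ans
      pvALoop rest (some v) ans' e1
    else
      let e : Int := ans.length
      let ans' := pvAInner v 0 ans.length ans
      pvALoop rest (some v) ans' e

def duplicate_subsequence (arr : List Int) : List (List Int) :=
  pvALoop arr none [[]] 0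

-- ===== PORT B =====
-- the 'runs' scan: append (x,1), or bump the count of the last run (runs[-1] = (x, c+1)).
def pvBRuns (arr : List Int) : List (Int × Int) :=
  arr.foldl
    (fun runs x =>
      match runs.getLast? with
      | some (y, c) => if y = x then runs.dropLast ++ [(x, c + 1)] else runs ++ [(x, 1)]
      | none => runs ++ [(x, 1)])
    []

-- 'base = ans; for k in range(1, c+1): ans = ans + [s + [v]*k for s in base]'
def pvBExtend (v : Int) (c : Int) (base : List (List Int)) : List (List Int) :=
  (PySem.List.pyRange 1 (c + 1) 1).foldl
    (fun acc k => acc ++ base.map (fun s => s ++ List.replicate k.toNat v)) base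

def duplicate_subsequence_alt (arr : List Int) : List (List Int) :=
  (pvBRuns arr).foldl (fun ans p => pvBExtend p.1 p.2 ans) [[]]

-- ===== PRECONDITION & SPEC =====
def Spec_duplicate_subsequence (arr : List Int) (out : List (List Int)) : Prop := out = duplicate_subsequence_alt arr
instance (arr : List Int) (out : List (List Int)) : Decidable (Spec_duplicate_subsequence arr out) := by unfold Spec_duplicate_subsequence; infer_instance

-- ===== CLAIM (what is proved, stated in full; the proofs are below) =====
def Claim_equal_duplicate_subsequence : Prop := ∀ (arr : List Int), Dom_duplicate_subsequence arr → Spec_duplicate_subsequence arr (duplicate_subsequence arr)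

-- ===== LEMMAS AND PROOFS =====

-- the state after extending 'base' with 1..j copies of v (B's per-run result, A's invariant)
def pvS (base : List (List Int)) (v : Int) (j : Nat) : List (List Int) :=
  base ++ (PySem.List.pyRange 1 ((j : Int) + 1) 1).flatMap
    (fun k => base.map (fun s => s ++ List.replicate k.toNat v))

-- canonical run decomposition (proof-side reference for pvBRuns)
def pvRunsF : List Int → List (Int × Int)
  | [] => []
  | v :: t =>
    (v, (1 : Int) + (t.takeWhile (· == v)).length) :: pvRunsF (t.dropWhile (· == v))
termination_by l => l.length
decreasing_by
  exact Nat.lt_succ_of_le (List.length_dropWhile_le _ t)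

theorem pvRunsF_nil : pvRunsF [] = [] := by rw [pvRunsF]

theorem pvRunsF_cons (v : Int) (t : List Int) :
    pvRunsF (v :: t) =
      (v, (1 : Int) + (t.takeWhile (· == v)).length) :: pvRunsF (t.dropWhile (· == v)) := by
  rw [pvRunsF]

theorem pvS_zero (base : List (List Int)) (v : Int) : pvS base v 0 = base := by
  rw [pvS, PySem.List.pyRange_one_eq_nil (by norm_num)]
  simp

theorem pvS_succ (base : List (List Int)) (v : Int) (j : Nat) :
    pvS base v (j + 1) =
      pvS base v j ++ base.map (fun s => s ++ List.replicate (j + 1) v) := by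
  rw [pvS, pvS]
  push_cast
  rw [PySem.List.pyRange_one_succ_right (a := 1) (b := (j : Int) + 1) (by omega),
      List.flatMap_append]
  simp [List.append_assoc]

theorem pvS_length (base : List (List Int)) (v : Int) (j : Nat) :
    (pvS base v j).length = (j + 1) * base.length := by
  induction j with
  | zero => simp [pvS_zero]
  | succ j ih => rw [pvS_succ]; simp [ih]; ring

theorem pvS_drop (base : List (List Int)) (v : Int) (j : Nat) :
    (pvS base v (j + 1)).drop ((j + 1) * base.length) =
      base.map (fun s => s ++ List.replicate (j + 1) v) := by
  rw [pvS_succ, ← pvS_length base v j, List.drop_left]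

-- A's inner append loop with valid indices, generalized over the already-appended tail
theorem pvAInner_aux (v : Int) (r : List Int) :
    ∀ (ans tail : List (List Int)), (∀ j ∈ r, 0 ≤ j ∧ j < (ans.length : Int)) →
      r.foldl (fun acc j => acc ++ [PySem.List.pyGetD acc j [] ++ [v]]) (ans ++ tail) =
        ans ++ tail ++ r.map (fun j => PySem.List.pyGetD ans j [] ++ [v]) := by
  induction r with
  | nil => simp
  | cons j r ih =>
    intro ans tail h
    obtain ⟨h0, h1⟩ := h j (by simp)
    have hget : PySem.List.pyGetD (ans ++ tail) j ([] : List Int) =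
        PySem.List.pyGetD ans j [] := by
      rw [PySem.List.pyGetD_eq_getElem (ans ++ tail) [] h0 (by simp; omega),
          PySem.List.pyGetD_eq_getElem ans [] h0 h1]
      exact List.getElem_append_left _
    simp only [List.foldl_cons, List.map_cons, hget]
    have := ih ans (tail ++ [PySem.List.pyGetD ans j [] ++ [v]])
      (fun j hj => h j (by simp [hj]))
    simpa [List.append_assoc] using this

theorem pvAInner_char (v : Int) (a : Int) (ans : List (List Int)) (ha : 0 ≤ a) :
    pvAInner v a ans.length ans = ans ++ (ans.drop a.toNat).map (fun s => s ++ [v]) := by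
  rw [pvAInner]
  have h := pvAInner_aux v (PySem.List.pyRange a ans.length 1) ans []
    (fun j hj => by
      rw [PySem.List.mem_pyRange_one] at hj
      exact ⟨le_trans ha hj.1, hj.2⟩)
  simp only [List.append_nil] at h
  rw [h]
  have : (PySem.List.pyRange a ans.length 1).map
      (fun j => PySem.List.pyGetD ans j ([] : List Int) ++ [v]) =
      ((PySem.List.pyRange a ans.length 1).map
        (fun j => PySem.List.pyGetD ans j ([] : List Int))).map (fun s => s ++ [v]) := by
    simp [List.map_map, Function.comp]
  rw [this, PySem.List.map_pyGetD_pyRange' ans [] ha]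

-- one duplicate-branch step of A, from the run invariant (ans = pvS base v j, end = j·|base|)
theorem pvALoop_cons_dup (v : Int) (rest : List Int) (ans : List (List Int)) (e : Int) :
    pvALoop (v :: rest) (some v) ans e =
      pvALoop rest (some v) (pvAInner v e ans.length ans) (ans.length : Int) := by
  rw [pvALoop]; simp

-- one duplicate-branch step of A, from the run invariant (ans = pvS base v j, end = j*|base|)
theorem pvA_dup_step (base : List (List Int)) (v : Int) (j : Nat) (hj : 1 ≤ j)
    (rest : List Int) :
    pvALoop (v :: rest) (some v) (pvS base v j) ((j * base.length : Nat) : Int) =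
      pvALoop rest (some v) (pvS base v (j + 1)) (((j + 1) * base.length : Nat) : Int) := by
  obtain ⟨i, rfl⟩ : ∃ i, j = i + 1 := ⟨j - 1, by omega⟩
  rw [pvALoop_cons_dup]
  have hfun : ((fun s => s ++ [v]) ∘ fun s => s ++ List.replicate (i + 1) v) =
      (fun s : List Int => s ++ List.replicate (i + 1 + 1) v) := by
    funext s
    simp only [Function.comp, List.append_assoc]
    rw [← List.replicate_succ']
  rw [pvAInner_char v _ _ (by positivity), Int.toNat_natCast, pvS_drop, List.map_map, hfun,
    ← pvS_succ, pvS_length]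

-- a whole tail of m duplicates of v
theorem pvA_run_chain (base : List (List Int)) (v : Int) (m : Nat) :
    ∀ (j : Nat), 1 ≤ j → ∀ (rest : List Int),
      pvALoop (List.replicate m v ++ rest) (some v) (pvS base v j)
          ((j * base.length : Nat) : Int) =
        pvALoop rest (some v) (pvS base v (j + m)) (((j + m) * base.length : Nat) : Int) := by
  induction m with
  | zero => intro j hj rest; simp
  | succ m ih =>
    intro j hj rest
    rw [List.replicate_succ, List.cons_append, pvA_dup_step base v j hj]
    have h2 := ih (j + 1) (by omega) rest
    rw [show j + 1 + m = j + (m + 1) from by omega] at h2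
    exact h2

-- the first element of a run (prev does not match): one doubling step lands on pvS ans v 1
theorem pvA_first_step (v : Int) (prev : Option Int) (hprev : prev ≠ some v)
    (ans : List (List Int)) (e : Int) (rest : List Int) :
    pvALoop (v :: rest) prev ans e =
      pvALoop rest (some v) (pvS ans v 1) ((1 * ans.length : Nat) : Int) := by
  rw [pvALoop]
  simp only [if_neg hprev]
  rw [pvAInner_char v 0 ans (le_refl 0)]
  congr 1
  · rw [pvS_succ, pvS_zero]
    simp
  · simp

-- B's per-run extension is pvS
theorem pvBExtend_eq_pvS (v : Int) (j : Nat) (base : List (List Int)) :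
    pvBExtend v ((j : Int)) base = pvS base v j := by
  rw [pvBExtend, pvS, PySem.List.foldl_append_eq_flatMap]

-- head of the dropWhile remainder is not v
theorem pv_dropWhile_head_ne (v : Int) :
    ∀ (t : List Int) (w : Int), (t.dropWhile (· == v)).head? = some w → w ≠ v := by
  intro t
  induction t with
  | nil => intro w h; simp at h
  | cons x t ih =>
    intro w h
    rw [List.dropWhile_cons] at h
    by_cases hx : x = v
    · simp only [hx, BEq.rfl, if_true] at h; exact ih w h
    · simp only [beq_iff_eq, if_neg hx, List.head?_cons, Option.some.injEq] at h
      exact h ▸ hx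

-- takeWhile (· == v) is a replicate of v
theorem pv_takeWhile_replicate (v : Int) (t : List Int) :
    t.takeWhile (· == v) = List.replicate (t.takeWhile (· == v)).length v := by
  apply List.eq_replicate_of_mem
  intro y hy
  have := List.mem_takeWhile_imp hy
  simpa using this

-- A's whole loop equals B's fold over the canonical runs
theorem pvA_eq_runsF :
    ∀ (n : Nat) (arr : List Int), arr.length ≤ n →
      ∀ (prev : Option Int), (∀ w, arr.head? = some w → prev ≠ some w) →
        ∀ (ans : List (List Int)) (e : Int),
          pvALoop arr prev ans e =
            (pvRunsF arr).foldl (fun a p => pvBExtend p.1 p.2 a) ans := by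
  intro n
  induction n with
  | zero =>
    intro arr hlen prev _ ans e
    have : arr = [] := List.eq_nil_of_length_eq_zero (by omega)
    subst this; rw [pvRunsF_nil]; rfl
  | succ n ih =>
    intro arr hlen prev hprev ans e
    match arr with
    | [] => rw [pvRunsF_nil]; rfl
    | v :: t =>
      set m := (t.takeWhile (· == v)).length with hm
      have hsplit : t = List.replicate m v ++ t.dropWhile (· == v) := by
        conv_lhs => rw [← List.takeWhile_append_dropWhile (p := (· == v)) (l := t)]
        rw [← pv_takeWhile_replicate]
      rw [pvA_first_step v prev (hprev v rfl) ans e]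
      conv_lhs => rw [hsplit]
      rw [pvA_run_chain ans v m 1 (le_refl 1)]
      rw [ih (t.dropWhile (· == v))
            (by have := List.length_dropWhile_le (· == v) t; simp at hlen; omega)
            (some v)
            (fun w hw hsome => (pv_dropWhile_head_ne v t w hw) (by injection hsome; omega))]
      rw [pvRunsF_cons]
      simp only [List.foldl_cons]
      congr 1
      have : ((1 : Int) + (m : Int)) = (((1 + m : Nat) : Int)) := by push_cast; ring
      rw [this, pvBExtend_eq_pvS]

-- proof-side name for B's run-scan step (definitionally the lambda in pvBRuns)
def pvStep (runs : List (Int × Int)) (x : Int) : List (Int × Int) :=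
  match runs.getLast? with
  | some (y, c) => if y = x then runs.dropLast ++ [(x, c + 1)] else runs ++ [(x, 1)]
  | none => runs ++ [(x, 1)]

theorem pvBRuns_eq_foldl_pvStep (arr : List Int) : pvBRuns arr = arr.foldl pvStep [] := rfl

theorem pvStep_concat_eq (acc0 : List (Int × Int)) (v : Int) (c : Int) :
    pvStep (acc0 ++ [(v, c)]) v = acc0 ++ [(v, c + 1)] := by
  rw [pvStep, List.getLast?_concat]
  simp

-- absorbing a block of m duplicates into the last run
theorem pvBRuns_merge (v : Int) (m : Nat) :
    ∀ (c : Int) (rest : List Int) (acc0 : List (Int × Int)),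
      (List.replicate m v ++ rest).foldl pvStep (acc0 ++ [(v, c)]) =
        rest.foldl pvStep (acc0 ++ [(v, c + (m : Int))]) := by
  induction m with
  | zero => intro c rest acc0; simp
  | succ m ih =>
    intro c rest acc0
    rw [List.replicate_succ, List.cons_append, List.foldl_cons, pvStep_concat_eq,
        ih (c + 1) rest acc0]
    have hc : c + 1 + (m : Int) = c + (((m + 1 : Nat)) : Int) := by push_cast; ring
    rw [hc]

theorem pvBRuns_aux :
    ∀ (n : Nat) (arr : List Int), arr.length ≤ n →
      ∀ (acc0 : List (Int × Int)),
        (∀ p, acc0.getLast? = some p → ∀ w, arr.head? = some w → p.1 ≠ w) →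
        arr.foldl pvStep acc0 = acc0 ++ pvRunsF arr := by
  intro n
  induction n with
  | zero =>
    intro arr hlen acc0 _
    have : arr = [] := List.eq_nil_of_length_eq_zero (by omega)
    subst this; rw [pvRunsF_nil]; simp
  | succ n ih =>
    intro arr hlen acc0 hacc
    match arr with
    | [] => rw [pvRunsF_nil]; simp
    | v :: t =>
      set m := (t.takeWhile (· == v)).length with hm
      have hsplit : t = List.replicate m v ++ t.dropWhile (· == v) := by
        conv_lhs => rw [← List.takeWhile_append_dropWhile (p := (· == v)) (l := t)]
        rw [← pv_takeWhile_replicate]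
      have hfirst : pvStep acc0 v = acc0 ++ [(v, (1 : Int))] := by
        rw [pvStep]
        match h : acc0.getLast? with
        | none => rfl
        | some p =>
          have := hacc p h v rfl
          cases p with
          | mk y c => simp only [if_neg this]
      rw [List.foldl_cons, hfirst]
      conv_lhs => rw [hsplit]
      rw [pvBRuns_merge v m 1]
      rw [ih (t.dropWhile (· == v))
            (by have := List.length_dropWhile_le (· == v) t; simp at hlen; omega)
            (acc0 ++ [(v, 1 + (m : Int))])
            (by
              intro p hp w hw
              rw [List.getLast?_concat] at hp
              injection hp with hp
              subst hp
              exact fun hvw => (pv_dropWhile_head_ne v t w hw) hvw.symm)]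
      rw [pvRunsF_cons, List.append_assoc]
      rfl

theorem pvBRuns_eq_runsF (arr : List Int) : pvBRuns arr = pvRunsF arr := by
  rw [pvBRuns_eq_foldl_pvStep,
      pvBRuns_aux arr.length arr (le_refl _) [] (by intro p hp; simp at hp)]
  simp

-- ===== VERDICT (by name: the statement is the Claim_ definition above) =====
theorem duplicate_subsequence_spec : Claim_equal_duplicate_subsequence := by
  intro arr _
  unfold Spec_duplicate_subsequence duplicate_subsequence duplicate_subsequence_alt
  rw [pvBRuns_eq_runsF]
  exact pvA_eq_runsF arr.length arr (le_refl _) none (by intro w _ h; cases h) [[]] 0
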